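-- pv_equiv track=rewrite | github.com/flag007/tools | dgen/dgen.py | prepend_word_every_index
-- ===== SOURCE A (Python) =====
-- def prepend_word_every_index(parts, words):
--     domains = []
--
--     for w in words:
--         for i in range(len(parts[:-1])):
--             tmp_parts = parts[:-1]
--             tmp_parts[i] = '{}{}'.format(w, tmp_parts[i])
--             domains.append('.'.join(tmp_parts + [parts[-1]]))
--
--             tmp_parts = parts[:-1]
--             tmp_parts[i] = '{}-{}'.format(w, tmp_parts[i])
--             domains.append('.'.join(tmp_parts + [parts[-1]]))
--
--     return domains
-- ===== SOURCE B (Python) =====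
-- def prepend_word_every_index(parts, words):
--     # Precompute per-index joined prefix/suffix once; inner loop only concatenates.
--     slots = []
--     for i in range(len(parts) - 1):
--         pre = '.'.join(parts[:i]) + '.' if i > 0 else ''
--         suf = '.' + '.'.join(parts[i + 1:])
--         slots.append((pre, parts[i], suf))
--     out = []
--     for w in words:
--         for pre, p, suf in slots:
--             out.append(pre + w + p + suf)
--             out.append(pre + w + '-' + p + suf)
--     return out
-- ===== Notes on version B (the rewrite author's own statement) =====
-- stated objective: alternative
-- what changed: B precomputes for each index a (joined-prefix, element, joined-suffix) slot once, then the word loop only concatenates strings, instead of A's copying parts[:-1] and re-joining the whole list twice per (word, index).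
import Mathlib
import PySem

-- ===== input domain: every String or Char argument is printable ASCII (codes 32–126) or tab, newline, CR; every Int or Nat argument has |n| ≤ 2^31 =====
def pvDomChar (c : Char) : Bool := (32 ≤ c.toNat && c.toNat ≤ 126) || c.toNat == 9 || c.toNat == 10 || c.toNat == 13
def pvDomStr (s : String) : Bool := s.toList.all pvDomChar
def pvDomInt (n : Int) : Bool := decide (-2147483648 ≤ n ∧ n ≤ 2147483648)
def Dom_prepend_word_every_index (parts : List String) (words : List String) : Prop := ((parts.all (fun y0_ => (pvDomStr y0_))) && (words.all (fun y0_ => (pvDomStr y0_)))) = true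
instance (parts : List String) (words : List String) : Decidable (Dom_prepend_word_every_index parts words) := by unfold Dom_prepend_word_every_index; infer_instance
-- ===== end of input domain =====

-- B precomputes each index's joined prefix/suffix once instead of copying and re-joining the
-- whole list per (word, index); objective: alternative decomposition.

-- ===== PORT A =====
-- 'parts[-1]' is only evaluated when the loop body runs (len(parts) ≥ 2), so its total form
-- pyGetD … "" is exact on every input A returns on (the default is never used).
def prepend_word_every_index (parts : List String) (words : List String) : List String :=
  words.foldl (fun domains w =>
    (PySem.List.pyRange 0 ((PySem.List.slice parts none (some (-1))).length : Int) 1).foldl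
      (fun domains i =>
        let tmp_parts := PySem.List.slice parts none (some (-1))
        let tmp_parts := PySem.List.pySetD tmp_parts i (w ++ PySem.List.pyGetD tmp_parts i "")
        let domains := domains ++ [PySem.Str.join "." (tmp_parts ++ [PySem.List.pyGetD parts (-1) ""])]
        let tmp_parts2 := PySem.List.slice parts none (some (-1))
        let tmp_parts2 := PySem.List.pySetD tmp_parts2 i (w ++ "-" ++ PySem.List.pyGetD tmp_parts2 i "")
        domains ++ [PySem.Str.join "." (tmp_parts2 ++ [PySem.List.pyGetD parts (-1) ""])])
      domains) []

-- ===== PORT B =====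
def pvSlots (parts : List String) : List (String × String × String) :=
  (PySem.List.pyRange 0 ((parts.length : Int) - 1) 1).foldl (fun slots i =>
    let pre := if 0 < i then PySem.Str.join "." (PySem.List.slice parts none (some i)) ++ "." else ""
    let suf := "." ++ PySem.Str.join "." (PySem.List.slice parts (some (i + 1)) none)
    slots ++ [(pre, PySem.List.pyGetD parts i "", suf)]) []

def prepend_word_every_index_alt (parts : List String) (words : List String) : List String :=
  let slots := pvSlots parts
  words.foldl (fun out w =>
    slots.foldl (fun out s =>
      out ++ [s.1 ++ w ++ s.2.1 ++ s.2.2, s.1 ++ w ++ "-" ++ s.2.1 ++ s.2.2]) out) []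

-- ===== PRECONDITION & SPEC =====
def Spec_prepend_word_every_index (parts : List String) (words : List String) (out : List String) : Prop := out = prepend_word_every_index_alt parts words
instance (parts : List String) (words : List String) (out : List String) : Decidable (Spec_prepend_word_every_index parts words out) := by unfold Spec_prepend_word_every_index; infer_instance

-- ===== CLAIM (what is proved, stated in full; the proofs are below) =====
def Claim_equal_prepend_word_every_index : Prop := ∀ (parts : List String) (words : List String), Dom_prepend_word_every_index parts words → Spec_prepend_word_every_index parts words (prepend_word_every_index parts words)

-- ===== LEMMAS AND PROOFS =====

-- joining a cons with a nonempty tail splits off one separator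
theorem pv_join_cons (sep x : List Char) (ys : List (List Char)) (hy : ys ≠ []) :
    PySem.Chars.join sep (x :: ys) = x ++ sep ++ PySem.Chars.join sep ys := by
  cases ys with
  | nil => exact absurd rfl hy
  | cons y ys' => exact PySem.Chars.join_cons_cons sep x y ys'

-- the heart of the equivalence: joining a list with index k replaced, at the Chars level
theorem pv_join_set (sep : List Char) (L : List (List Char)) (last v : List Char)
    (k : Nat) (hk : k < L.length) :
    PySem.Chars.join sep (L.set k v ++ [last]) =
      (if 0 < k then PySem.Chars.join sep (L.take k) ++ sep else []) ++ v ++ sep ++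
        PySem.Chars.join sep (L.drop (k + 1) ++ [last]) := by
  induction L generalizing k with
  | nil => simp at hk
  | cons x xs ih =>
    cases k with
    | zero =>
      simp only [List.set_cons_zero, List.take_zero, List.drop_succ_cons, List.drop_zero,
        if_neg (by omega : ¬ (0:Nat) < 0), List.cons_append]
      rw [pv_join_cons sep v (xs ++ [last]) (by simp)]
      simp
    | succ k' =>
      have hk' : k' < xs.length := by simp only [List.length_cons] at hk; omega
      simp only [List.set_cons_succ, List.take_succ_cons, List.drop_succ_cons, List.cons_append]
      rw [pv_join_cons sep x (xs.set k' v ++ [last]) (by simp), ih k' hk',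
        if_pos (Nat.succ_pos k')]
      cases Nat.eq_zero_or_pos k' with
      | inl h0 =>
        subst h0
        simp [PySem.Chars.join_singleton]
      | inr hpos =>
        rw [if_pos hpos,
          pv_join_cons sep x (xs.take k') (by
            apply List.ne_nil_of_length_pos
            rw [List.length_take]
            omega)]
        simp [List.append_assoc]

-- Python parts[-1] on a nonempty list is its last element
theorem pv_pyGetD_neg_one (xs : List String) (h : xs ≠ []) :
    PySem.List.pyGetD xs (-1) "" = xs.getLast h := by
  have hl : 0 < xs.length := List.length_pos_iff.mpr h
  simp only [PySem.List.pyGetD, PySem.List.pyGet?, PySem.List.pyIdx?]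
  rw [if_neg (by omega), if_pos (by omega : -(xs.length:Int) ≤ -1)]
  simp only [Option.bind_some]
  rw [List.getElem?_eq_getElem (by omega)]
  simp [List.getLast_eq_getElem]

-- B's per-index slot, as a direct function of the index
def pvSlotFn (parts : List String) (i : Int) : String × String × String :=
  ((if 0 < i then PySem.Str.join "." (PySem.List.slice parts none (some i)) ++ "." else ""),
   PySem.List.pyGetD parts i "",
   "." ++ PySem.Str.join "." (PySem.List.slice parts (some (i + 1)) none))

theorem pv_slots_eq (parts : List String) :
    pvSlots parts = (PySem.List.pyRange 0 ((parts.length : Int) - 1) 1).map (pvSlotFn parts) := by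
  unfold pvSlots
  rw [show (fun (slots : List (String × String × String)) (i : Int) =>
      let pre := if 0 < i then PySem.Str.join "." (PySem.List.slice parts none (some i)) ++ "." else ""
      let suf := "." ++ PySem.Str.join "." (PySem.List.slice parts (some (i + 1)) none)
      slots ++ [(pre, PySem.List.pyGetD parts i "", suf)]) =
      (fun slots i => slots ++ (fun j => [pvSlotFn parts j]) i) from rfl,
    PySem.List.foldl_append_eq_flatMap]
  exact Eq.symm List.map_eq_flatMap

-- A's two strings for word w at index i equal B's, for every i in the loop's range
theorem pv_strings_eq (parts : List String) (i : Int)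
    (h0 : 0 ≤ i) (h1 : i < (parts.length : Int) - 1) (v : String) :
    PySem.Str.join "."
        (PySem.List.pySetD parts.dropLast i
            (v ++ PySem.List.pyGetD parts.dropLast i "") ++
          [PySem.List.pyGetD parts (-1) ""]) =
      (pvSlotFn parts i).1 ++ v ++ (pvSlotFn parts i).2.1 ++ (pvSlotFn parts i).2.2 := by
  have hlen : 2 ≤ parts.length := by omega
  have hne : parts ≠ [] := by
    intro hnil; rw [hnil] at hlen; simp at hlen
  have hik : i = (i.toNat : Int) := (Int.toNat_of_nonneg h0).symm
  have hdl : parts.dropLast.length = parts.length - 1 := List.length_dropLast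
  have hkl : i.toNat < parts.length - 1 := by omega
  rw [PySem.List.pySetD_of_nonneg _ _ h0, pv_pyGetD_neg_one parts hne,
    PySem.List.pyGetD_eq_getElem parts.dropLast "" h0 (by rw [hdl]; omega)]
  unfold pvSlotFn
  rw [PySem.List.slice_to parts h0, PySem.List.slice_from parts (by omega),
    PySem.List.pyGetD_eq_getElem parts "" h0 (by omega)]
  have h1n : (i + 1).toNat = i.toNat + 1 := by omega
  rw [h1n]
  apply String.toList_inj.mp
  have hMne : parts.map String.toList ≠ [] := by simp [hne]
  simp only [PySem.Str.toList_join, String.toList_append, List.map_append, List.map_set,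
    List.map_cons, List.map_nil, List.map_dropLast, List.map_take, List.map_drop,
    apply_ite String.toList]
  have hdot : (".":String).toList = ['.'] := rfl
  have hemp : ("":String).toList = [] := rfl
  have hgl : (parts.getLast hne).toList = (parts.map String.toList).getLast hMne := by
    rw [List.getLast_map]
  rw [hdot, hemp, hgl]
  rw [pv_join_set ['.'] ((parts.map String.toList).dropLast)
      (((parts.map String.toList)).getLast hMne) _ i.toNat
      (by simp [List.length_dropLast]; omega)]
  have hge : (parts.dropLast[i.toNat]'(by rw [hdl]; omega)).toList =
      (parts[i.toNat]'(by omega)).toList := by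
    rw [List.getElem_dropLast]
  have htk : (parts.map String.toList).dropLast.take i.toNat =
      (parts.map String.toList).take i.toNat := by
    rw [List.dropLast_eq_take, List.take_take]
    congr 1
    simp
    omega
  have hdr : (parts.map String.toList).dropLast.drop (i.toNat + 1) ++
      [(parts.map String.toList).getLast hMne] = (parts.map String.toList).drop (i.toNat + 1) := by
    conv_rhs => rw [← List.dropLast_append_getLast hMne]
    rw [List.drop_append]
    congr 1
    have : i.toNat + 1 - (parts.map String.toList).dropLast.length = 0 := by
      simp [List.length_dropLast]; omega
    rw [this, List.drop_zero]
  rw [hge, htk, hdr]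
  rcases Int.lt_or_le 0 i with hipos | hile
  · rw [if_pos hipos, if_pos (by omega : 0 < i.toNat)]
    simp [List.append_assoc]
  · have : i = 0 := by omega
    subst this
    simp [List.append_assoc]

-- ===== VERDICT (by name: the statement is the Claim_ definition above) =====
theorem prepend_word_every_index_spec : Claim_equal_prepend_word_every_index := by
  intro parts words _
  unfold Spec_prepend_word_every_index prepend_word_every_index prepend_word_every_index_alt
  rw [pv_slots_eq]
  have hR : PySem.List.pyRange 0 ((parts.dropLast.length : Int)) 1
      = PySem.List.pyRange 0 ((parts.length : Int) - 1) 1 := by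
    rcases parts with _ | ⟨p, ps⟩
    · rw [PySem.List.pyRange_one_eq_nil (by norm_num), PySem.List.pyRange_one_eq_nil (by norm_num)]
    · congr 1
      simp [List.length_dropLast]
  apply PySem.List.foldl_congr_mem
  intro acc w hw
  simp only [PySem.List.slice_to_neg_one]
  rw [hR, List.foldl_map]
  apply PySem.List.foldl_congr_mem
  intro acc' i hi
  obtain ⟨h0, h1⟩ := PySem.List.mem_pyRange_one.mp hi
  rw [pv_strings_eq parts i h0 h1 w, pv_strings_eq parts i h0 h1 (w ++ "-")]
  simp [List.append_assoc, String.append_assoc]
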